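-- pv_equiv track=rewrite | github.com/psimps21/SirPaulMcBotney | process_midis.py | get_double_measures
-- ===== SOURCE A (Python) =====
-- def get_double_measures(measures):
--     new_start = 0
--     new_measures = []
--
--     for i, m in enumerate(measures):
--         start, end = m
--         if i % 2 == 0:
--             new_start = start
--         else:
--             new_measures.append((new_start, end))
--
--     return new_measures
-- ===== SOURCE B (Python) =====
-- def get_double_measures(measures):
--     return [(a[0], b[1]) for a, b in zip(measures[::2], measures[1::2])]
-- ===== Notes on version B (the rewrite author's own statement) =====
-- stated objective: idiomatic
-- what changed: Replaces the parity-flag state machine (enumerate + i%2 branch + carried new_start) with a direct pairing: zip the even- and odd-indexed slices and map each pair to (start of first, end of second); the odd trailing measure is dropped by zip automatically.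
import Mathlib
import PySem

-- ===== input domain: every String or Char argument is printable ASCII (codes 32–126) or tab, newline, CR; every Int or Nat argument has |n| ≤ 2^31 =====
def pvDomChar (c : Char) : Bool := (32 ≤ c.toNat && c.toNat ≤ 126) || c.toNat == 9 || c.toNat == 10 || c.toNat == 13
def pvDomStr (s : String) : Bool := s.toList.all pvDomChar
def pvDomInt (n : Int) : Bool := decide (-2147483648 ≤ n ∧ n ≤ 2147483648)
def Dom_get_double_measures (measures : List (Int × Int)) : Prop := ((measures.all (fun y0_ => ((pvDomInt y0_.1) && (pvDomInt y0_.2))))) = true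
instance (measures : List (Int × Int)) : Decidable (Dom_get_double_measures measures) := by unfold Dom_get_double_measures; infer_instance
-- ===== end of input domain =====

-- B replaces A's parity-flag state machine with zipping the even/odd-indexed slices (idiomatic decomposition, same cost).


-- ===== PORT A =====
-- One loop step of A: i % 2 == 0 sets new_start, else appends (new_start, end).
-- (loop index is nonnegative, so Lean's `%` with divisor 2 coincides with Python's `%`)
def gdmStep (st : Int × List (Int × Int)) (im : Int × (Int × Int)) : Int × List (Int × Int) :=
  if im.1 % 2 == 0 then (im.2.1, st.2) else (st.1, st.2 ++ [(st.1, im.2.2)])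

def get_double_measures (measures : List (Int × Int)) : List (Int × Int) :=
  (List.foldl gdmStep (0, []) (PySem.List.enumerate measures 0)).2

-- ===== PORT B =====
-- exact hand port of the step-2 slice xs[::2] (PySem.List.slice has no step parameter)
def everyOther {α : Type} : List α → List α
  | [] => []
  | [x] => [x]
  | x :: _ :: rest => x :: everyOther rest

def get_double_measures_alt (measures : List (Int × Int)) : List (Int × Int) :=
  ((everyOther measures).zip (everyOther (measures.drop 1))).map (fun p => (p.1.1, p.2.2))

-- ===== PRECONDITION & SPEC =====
def Spec_get_double_measures (measures : List (Int × Int)) (out : List (Int × Int)) : Prop := out = get_double_measures_alt measures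
instance (measures : List (Int × Int)) (out : List (Int × Int)) : Decidable (Spec_get_double_measures measures out) := by unfold Spec_get_double_measures; infer_instance

-- ===== CLAIM (what is proved, stated in full; the proofs are below) =====
def Claim_equal_get_double_measures : Prop := ∀ (measures : List (Int × Int)), Dom_get_double_measures measures → Spec_get_double_measures measures (get_double_measures measures)

-- ===== LEMMAS AND PROOFS =====

theorem alt_nil : get_double_measures_alt [] = [] := rfl

theorem alt_single (x : Int × Int) : get_double_measures_alt [x] = [] := rfl

theorem alt_cons₂ (x y : Int × Int) (rest : List (Int × Int)) :
    get_double_measures_alt (x :: y :: rest) = (x.1, y.2) :: get_double_measures_alt rest := by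
  cases rest with
  | nil => rfl
  | cons r rs => simp [get_double_measures_alt, everyOther]

-- Loop invariant for A's fold: with accumulator acc, pending start ns, and next index s ≥ 0,
-- the fold appends B's value of the remaining list (shifted by one pending pair when s is odd).
theorem gdm_loop (xs : List (Int × Int)) : ∀ (s ns : Int) (acc : List (Int × Int)), 0 ≤ s →
    (List.foldl gdmStep (ns, acc) (PySem.List.enumerate xs s)).2 =
      acc ++ (if s % 2 = 0 then get_double_measures_alt xs
              else match xs with
                   | [] => []
                   | y :: rest => (ns, y.2) :: get_double_measures_alt rest) := by
  induction xs with
  | nil => intro s ns acc hs; simp only [PySem.List.enumerate_nil, List.foldl_nil]; split <;> simp [alt_nil]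
  | cons x xs ih =>
    intro s ns acc hs
    rw [PySem.List.enumerate_cons, List.foldl_cons]
    by_cases h : s % 2 = 0
    · have h1 : ¬ (s + 1) % 2 = 0 := by omega
      rw [gdmStep, if_pos (by simpa using h)]
      rw [ih (s+1) x.1 acc (by omega), if_neg h1, if_pos h]
      cases xs with
      | nil => simp [alt_single]
      | cons y rest => rw [alt_cons₂]
    · have h1 : (s + 1) % 2 = 0 := by omega
      rw [gdmStep, if_neg (by simpa using h)]
      rw [ih (s+1) ns (acc ++ [(ns, x.2)]) (by omega), if_pos h1, if_neg h]
      simp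

-- ===== VERDICT (by name: the statement is the Claim_ definition above) =====
theorem get_double_measures_spec : Claim_equal_get_double_measures := by
  intro measures _
  unfold Spec_get_double_measures get_double_measures
  rw [gdm_loop measures 0 0 [] le_rfl]; norm_num
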